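-- pv_equiv track=rewrite | github.com/kim-taewoo/TIL_PUBLIC | Algorithm/programmers/2019kakaoWinterIntern/불량사용자.py | solution
-- ===== SOURCE A (Python) =====
-- def solution(user_id, banned_id):
--     len_banned = len(banned_id)
--     matchListAll = []
--     for i in banned_id:
--         matchList = []
--         for j in user_id:
--             if len(i) == len(j):
--                 match = True
--                 for k in range(len(i)):
--                     if i[k] == '*':
--                         continue
--                     elif i[k] != j[k]:
--                         match = False
--                         break
--                 if match:
--                     matchList.append(j)
--         matchListAll.append(matchList)
--
--     all_combs = []
--     comb = []
--
--     def dfs(idx):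
--         if idx == len_banned:
--             sorted_comb = sorted(comb)
--             if sorted_comb not in all_combs:
--                 all_combs.append(sorted_comb[:])
--             return
--
--         for i in matchListAll[idx]:
--             if i not in comb:
--                 comb.append(i)
--                 dfs(idx+1)
--                 comb.pop()
--
--     dfs(0)
--     return (len(all_combs))
-- ===== SOURCE B (Python) =====
-- def solution(user_id, banned_id):
--     match_lists = [
--         [u for u in user_id
--          if len(u) == len(b) and all(bc == '*' or bc == uc for bc, uc in zip(b, u))]
--         for b in banned_id
--     ]
--     states = {()}
--     for ml in match_lists:
--         states = {tuple(sorted(s + (u,))) for s in states for u in ml if u not in s}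
--     return len(states)
-- ===== Notes on version B (the rewrite author's own statement) =====
-- stated objective: alternative
-- what changed: Replaced the recursive backtracking dfs (shared comb list with append/pop, dedup of sorted paths only at the leaves via a 'not in' list scan) by a level-wise BFS that keeps a set of sorted partial assignments and extends it one pattern at a time with per-level set dedup.
import Mathlib
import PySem

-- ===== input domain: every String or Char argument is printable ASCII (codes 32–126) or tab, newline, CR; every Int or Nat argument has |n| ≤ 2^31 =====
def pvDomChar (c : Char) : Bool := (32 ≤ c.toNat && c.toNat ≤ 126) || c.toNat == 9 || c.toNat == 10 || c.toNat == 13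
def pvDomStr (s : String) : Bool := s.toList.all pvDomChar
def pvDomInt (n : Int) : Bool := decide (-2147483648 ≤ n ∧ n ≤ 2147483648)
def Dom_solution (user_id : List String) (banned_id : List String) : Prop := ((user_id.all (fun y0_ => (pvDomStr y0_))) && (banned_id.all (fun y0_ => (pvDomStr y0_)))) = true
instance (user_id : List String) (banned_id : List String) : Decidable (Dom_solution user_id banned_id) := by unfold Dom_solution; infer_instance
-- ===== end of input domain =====

-- B replaces A's recursive backtracking dfs (shared comb list, dedup of sorted paths only at the
-- leaves) by a level-wise BFS: a set of sorted partial assignments, extended one pattern at a time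
-- with per-level set dedup (objective: alternative algorithm, same exact result).

-- ===== PORT A =====
-- A's inner character loop 'for k in range(len(i))' with break, as structural recursion over the
-- two character lists (only ever called under the guard len(i) == len(j), where it is exact).
def aMatch : List Char → List Char → Bool
  | [], _ => true
  | c :: cs, d :: ds => if c = '*' then aMatch cs ds else if c ≠ d then false else aMatch cs ds
  | _ :: _, [] => true

-- the dfs and its 'for i in matchListAll[idx]' row loop, as mutual recursion over the remaining
-- rows (rest) / the current row (ml); comb is appended/popped = passed extended down
mutual
def dfsA : List (List String) → List String → List (List String) → List (List String)
  | [], comb, acc =>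
      let s := PySem.List.sorted comb (fun x => x) false
      if acc.contains s then acc else acc ++ [s]
  | ml :: rest, comb, acc => dfsRowA ml rest comb acc
termination_by mls _ _ => (mls.length, 0)

def dfsRowA : List String → List (List String) → List String → List (List String) → List (List String)
  | [], _, _, acc => acc
  | i :: is, rest, comb, acc =>
      dfsRowA is rest comb (if comb.contains i then acc else dfsA rest (comb ++ [i]) acc)
termination_by ml rest _ _ => (rest.length, ml.length + 1)
end

def solution (user_id : List String) (banned_id : List String) : Int :=
  let matchListAll := banned_id.foldl
    (fun acc i => acc ++ [user_id.foldl
      (fun ml j =>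
        if i.toList.length == j.toList.length && aMatch i.toList j.toList
        then ml ++ [j] else ml) []]) []
  PySem.List.len (dfsA matchListAll [] [])

-- ===== PORT B =====
def bMatch (b u : String) : Bool :=
  b.toList.length == u.toList.length &&
    (b.toList.zip u.toList).all (fun p => p.1 == '*' || p.1 == p.2)

-- one level: {tuple(sorted(s + (u,))) for s in states for u in ml if u not in s}
def bStep (states : PySem.Set (List String)) (ml : List String) : PySem.Set (List String) :=
  states.foldl
    (fun ns s => ml.foldl
      (fun ns u =>
        if s.contains u then ns
        else PySem.Set.add ns (PySem.List.sorted (s ++ [u]) (fun x => x) false)) ns)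
    PySem.Set.empty

def solution_alt (user_id : List String) (banned_id : List String) : Int :=
  let matchLists := banned_id.map (fun b => user_id.filter (fun u => bMatch b u))
  let states := matchLists.foldl bStep (PySem.Set.add PySem.Set.empty [])
  PySem.Set.len states

-- ===== PRECONDITION & SPEC =====
def Spec_solution (user_id : List String) (banned_id : List String) (out : Int) : Prop := out = solution_alt user_id banned_id
instance (user_id : List String) (banned_id : List String) (out : Int) : Decidable (Spec_solution user_id banned_id out) := by unfold Spec_solution; infer_instance

-- ===== CLAIM (what is proved, stated in full; the proofs are below) =====
def Claim_equal_solution : Prop := ∀ (user_id : List String) (banned_id : List String), Dom_solution user_id banned_id → Spec_solution user_id banned_id (solution user_id banned_id)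

-- ===== LEMMAS AND PROOFS =====

-- proof-side: all choice tuples (one user per pattern row), built recursively
def prodR : List (List String) → List (List String)
  | [] => [[]]
  | ml :: rs => ml.flatMap (fun u => (prodR rs).map (fun t => u :: t))

-- A's pruning condition along a path: each element fresh w.r.t. comb-so-far
def fresh : List String → List String → Bool
  | _, [] => true
  | comb, x :: t => !comb.contains x && fresh (comb ++ [x]) t

lemma aMatch_zip : ∀ cs ds : List Char, cs.length = ds.length →
    aMatch cs ds = (cs.zip ds).all (fun p => p.1 == '*' || p.1 == p.2) := by
  intro cs
  induction cs with
  | nil => intro ds h; simp [aMatch]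
  | cons c cs ih =>
    intro ds h
    cases ds with
    | nil => simp at h
    | cons d ds =>
      simp only [List.length_cons, Nat.add_right_cancel_iff] at h
      simp only [aMatch, List.zip_cons_cons, List.all_cons, ih ds h]
      by_cases hc : c = '*'
      · simp [hc]
      · by_cases hd : c = d <;> simp [hc, hd]

lemma aMatch_eq_bMatch (b u : String) :
    (b.toList.length == u.toList.length && aMatch b.toList u.toList) = bMatch b u := by
  unfold bMatch
  by_cases h : b.toList.length = u.toList.length
  · simp [h, aMatch_zip _ _ h]
  · have hb : (b.toList.length == u.toList.length) = false := beq_eq_false_iff_ne.mpr h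
    rw [hb]
    simp

lemma fresh_iff (t comb : List String) :
    fresh comb t = true ↔ (∀ x ∈ t, x ∉ comb) ∧ t.Nodup := by
  induction t generalizing comb with
  | nil => simp [fresh]
  | cons x t ih =>
    simp only [fresh, Bool.and_eq_true, Bool.not_eq_true', ih, List.nodup_cons,
      List.mem_cons, List.mem_append]
    constructor
    · rintro ⟨hx, hall, hnd⟩
      have hx' : x ∉ comb := by simpa using hx
      refine ⟨?_, ?_, hnd⟩
      · rintro y (rfl | hy)
        · exact hx'
        · exact fun hc => (hall y hy) (Or.inl hc)
      · intro hxin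
        exact (hall x hxin) (by simp)
    · rintro ⟨hall, hxt, hnd⟩
      have hx' : x ∉ comb := hall x (Or.inl rfl)
      refine ⟨by simpa using hx', ?_, hnd⟩
      intro y hy hmem
      rcases hmem with hc | hx1
      · exact (hall y (Or.inr hy)) hc
      · have : y = x := by simpa using hx1
        exact hxt (this ▸ hy)

lemma dfs_eq (rest : List (List String)) : ∀ comb acc,
    dfsA rest comb acc
      = (prodR rest).foldl
          (fun acc t =>
            if fresh comb t
            then (let s := PySem.List.sorted (comb ++ t) (fun x => x) false
                  if acc.contains s then acc else acc ++ [s])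
            else acc) acc := by
  induction rest with
  | nil =>
    intro comb acc
    simp [dfsA, prodR, fresh]
  | cons ml rs ih =>
    intro comb acc
    rw [dfsA, prodR, List.foldl_flatMap]
    induction ml generalizing acc with
    | nil => simp [dfsRowA]
    | cons i is ihrow =>
      rw [dfsRowA, ihrow]
      simp only [List.foldl_cons]
      congr 1
      rw [List.foldl_map]
      by_cases hc : comb.contains i
      · simp only [if_pos hc]
        have : ∀ t, fresh comb (i :: t) = false := by
          intro t; simp only [fresh, hc, Bool.not_true, Bool.false_and]
        symm
        calc (prodR rs).foldl
              (fun acc t => if fresh comb (i :: t) = true then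
                (let s := PySem.List.sorted (comb ++ i :: t) (fun x => x) false;
                 if acc.contains s = true then acc else acc ++ [s]) else acc) acc
            = (prodR rs).foldl (fun acc _ => acc) acc := by
              apply PySem.List.foldl_congr_mem
              intro a x _; simp [this x]
          _ = acc := List.foldl_fixed _
      · simp only [if_neg hc]
        rw [ih (comb ++ [i]) acc]
        apply PySem.List.foldl_congr_mem
        intro a t _
        have hmem : i ∉ comb := by simpa using hc
        have h1 : fresh comb (i :: t) = fresh (comb ++ [i]) t := by
          simp [fresh, hmem]
        have h2 : comb ++ i :: t = (comb ++ [i]) ++ t := by simp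
        rw [h1, h2]

lemma mem_prodR (ml : List String) (rs : List (List String)) (t : List String) :
    t ∈ prodR (ml :: rs) ↔ ∃ u ∈ ml, ∃ r ∈ prodR rs, t = u :: r := by
  simp only [prodR, List.mem_flatMap, List.mem_map]
  constructor
  · rintro ⟨u, hu, r, hr, rfl⟩; exact ⟨u, hu, r, hr, rfl⟩
  · rintro ⟨u, hu, r, hr, rfl⟩; exact ⟨u, hu, r, hr, rfl⟩

-- 'if p t then g acc t else acc' folded over l is g folded over the p-filtered list
lemma foldl_if_filter {α β : Type} (p : α → Bool) (g : β → α → β) (l : List α) (init : β) :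
    l.foldl (fun a t => if p t then g a t else a) init = (l.filter p).foldl g init := by
  induction l generalizing init with
  | nil => rfl
  | cons x xs ih =>
    by_cases hp : p x
    · simp [hp, ih]
    · simp [hp, ih]

lemma nodup_foldl_add {β : Type} (f : β → List String) (l : List β)
    (s : PySem.Set (List String)) (hs : s.Nodup) :
    (l.foldl (fun s b => PySem.Set.add s (f b)) s).Nodup := by
  induction l generalizing s with
  | nil => exact hs
  | cons x xs ih => exact ih _ (PySem.Set.nodup_add s (f x) hs)

-- A's result list, characterised as a set: the sorted versions of the fresh product tuples
lemma dfsA_set (mls : List (List String)) :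
    (dfsA mls [] []).Nodup ∧
    ∀ x, x ∈ dfsA mls [] [] ↔
      ∃ t ∈ prodR mls, fresh [] t = true ∧ x = PySem.List.sorted t (fun x => x) false := by
  rw [dfs_eq]
  have hstep : (fun (acc : List (List String)) t =>
      if fresh [] t = true then
        (let s := PySem.List.sorted ([] ++ t) (fun x => x) false
         if acc.contains s = true then acc else acc ++ [s])
      else acc)
      = fun acc t => if fresh [] t = true
        then PySem.Set.add acc (PySem.List.sorted t (fun x => x) false) else acc := by
    funext acc t
    by_cases hf : fresh [] t = true
    · simp only [if_pos hf, List.nil_append, PySem.Set.add_eq_ite]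
      by_cases hs : PySem.List.sorted t (fun x => x) false ∈ acc
      · simp [hs]
      · simp [hs]
    · simp [hf]
  rw [hstep, foldl_if_filter]
  refine ⟨nodup_foldl_add _ _ [] List.nodup_nil, ?_⟩
  intro x
  rw [PySem.Set.mem_foldl_add]
  simp only [List.not_mem_nil, false_or, List.mem_filter]
  constructor
  · rintro ⟨t, ⟨ht, hf⟩, rfl⟩; exact ⟨t, ht, hf, rfl⟩
  · rintro ⟨t, ht, hf, rfl⟩; exact ⟨t, ⟨ht, hf⟩, rfl⟩

-- one B level, characterised as a set
lemma bStep_mem (states : PySem.Set (List String)) (ml : List String) :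
    (bStep states ml).Nodup ∧
    ∀ x, x ∈ bStep states ml ↔
      ∃ s ∈ states, ∃ u ∈ ml, u ∉ s ∧ x = PySem.List.sorted (s ++ [u]) (fun x => x) false := by
  have hinner : ∀ (ns : PySem.Set (List String)) (s : List String),
      ml.foldl (fun ns u =>
        if s.contains u then ns
        else PySem.Set.add ns (PySem.List.sorted (s ++ [u]) (fun x => x) false)) ns
      = (ml.filter (fun u => !s.contains u)).foldl
          (fun ns u => PySem.Set.add ns (PySem.List.sorted (s ++ [u]) (fun x => x) false)) ns := by
    intro ns s
    rw [← foldl_if_filter]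
    apply PySem.List.foldl_congr_mem
    intro a u _
    by_cases hc : u ∈ s
    · simp [hc]
    · simp [hc]
  unfold bStep
  have main : ∀ (states : List (List String)) (ns : PySem.Set (List String)), ns.Nodup →
      (states.foldl (fun ns s => ml.foldl (fun ns u =>
          if s.contains u then ns
          else PySem.Set.add ns (PySem.List.sorted (s ++ [u]) (fun x => x) false)) ns) ns).Nodup ∧
      ∀ x, x ∈ states.foldl (fun ns s => ml.foldl (fun ns u =>
          if s.contains u then ns
          else PySem.Set.add ns (PySem.List.sorted (s ++ [u]) (fun x => x) false)) ns) ns ↔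
        x ∈ ns ∨ ∃ s ∈ states, ∃ u ∈ ml, u ∉ s ∧
          x = PySem.List.sorted (s ++ [u]) (fun x => x) false := by
    intro states
    induction states with
    | nil => intro ns h; exact ⟨h, fun x => by simp⟩
    | cons s ss ih =>
      intro ns h
      simp only [List.foldl_cons]
      have hns' : (ml.foldl (fun ns u =>
          if s.contains u then ns
          else PySem.Set.add ns (PySem.List.sorted (s ++ [u]) (fun x => x) false)) ns).Nodup := by
        rw [hinner]; exact nodup_foldl_add _ _ ns h
      obtain ⟨hnd, hmem⟩ := ih _ hns'
      refine ⟨hnd, ?_⟩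
      intro x
      rw [hmem x, hinner, PySem.Set.mem_foldl_add]
      simp only [List.mem_filter, List.mem_cons, Bool.not_eq_eq_eq_not, Bool.not_true,
        List.contains_eq_mem, decide_eq_false_iff_not]
      constructor
      · rintro ((hx | ⟨u, ⟨hu, hus⟩, rfl⟩) | ⟨s', hs', u, hu, hus, rfl⟩)
        · exact Or.inl hx
        · exact Or.inr ⟨s, Or.inl rfl, u, hu, hus, rfl⟩
        · exact Or.inr ⟨s', Or.inr hs', u, hu, hus, rfl⟩
      · rintro (hx | ⟨s', hs' | hs', u, hu, hus, rfl⟩)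
        · exact Or.inl (Or.inl hx)
        · exact Or.inl (Or.inr ⟨u, ⟨hu, hs' ▸ hus⟩, by rw [hs']⟩)
        · exact Or.inr ⟨s', hs', u, hu, hus, rfl⟩
  obtain ⟨hnd, hmem⟩ := main states PySem.Set.empty List.nodup_nil
  refine ⟨hnd, fun x => ?_⟩
  rw [hmem x]
  simp [PySem.Set.empty]

-- freshness only reads membership of the accumulated prefix
lemma fresh_congr (t c1 c2 : List String) (h : ∀ y, y ∈ c1 ↔ y ∈ c2) :
    fresh c1 t = fresh c2 t := by
  cases h1 : fresh c1 t
  · cases h2 : fresh c2 t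
    · rfl
    · exfalso
      obtain ⟨hall, hnd⟩ := (fresh_iff t c2).mp h2
      have : fresh c1 t = true := (fresh_iff t c1).mpr ⟨fun x hx hc => hall x hx ((h x).mp hc), hnd⟩
      rw [h1] at this; cases this
  · obtain ⟨hall, hnd⟩ := (fresh_iff t c1).mp h1
    exact ((fresh_iff t c2).mpr ⟨fun x hx hc => hall x hx ((h x).mpr hc), hnd⟩).symm

-- sorting the left part first does not change the sorted result
lemma sorted_sorted_append (a t : List String) :
    PySem.List.sorted (PySem.List.sorted a (fun x => x) false ++ t) (fun x => x) false
      = PySem.List.sorted (a ++ t) (fun x => x) false := by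
  apply PySem.List.sorted_eq_sorted_of_perm
  · exact fun x y h => h
  · exact (PySem.List.sorted_perm a (fun x => x) false).append_right t

-- B's level fold, characterised as a set (states: a set of sorted partial assignments)
lemma bfold_mem (mls : List (List String)) :
    ∀ states : PySem.Set (List String), states.Nodup →
      (∀ s ∈ states, PySem.List.sorted s (fun x => x) false = s) →
      (mls.foldl bStep states).Nodup ∧
      ∀ x, x ∈ mls.foldl bStep states ↔
        ∃ s ∈ states, ∃ t ∈ prodR mls, fresh s t = true ∧
          x = PySem.List.sorted (s ++ t) (fun x => x) false := by
  induction mls with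
  | nil =>
    intro states hnd hsort
    refine ⟨hnd, fun x => ?_⟩
    simp only [List.foldl_nil, prodR, List.mem_singleton]
    constructor
    · intro hx
      exact ⟨x, hx, [], rfl, rfl, by rw [List.append_nil, hsort x hx]⟩
    · rintro ⟨s, hs, t, rfl, -, rfl⟩
      rw [List.append_nil, hsort s hs]; exact hs
  | cons ml rs ih =>
    intro states hnd hsort
    simp only [List.foldl_cons]
    obtain ⟨hnd1, hmem1⟩ := bStep_mem states ml
    have hsort1 : ∀ s ∈ bStep states ml, PySem.List.sorted s (fun x => x) false = s := by
      intro s hs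
      obtain ⟨s0, -, u, -, -, rfl⟩ := (hmem1 s).mp hs
      exact PySem.List.sorted_sorted _ _
    obtain ⟨hnd2, hmem2⟩ := ih (bStep states ml) hnd1 hsort1
    refine ⟨hnd2, fun x => ?_⟩
    rw [hmem2 x]
    constructor
    · rintro ⟨s', hs', t, ht, hf, rfl⟩
      obtain ⟨s, hs, u, hu, hus, rfl⟩ := (hmem1 s').mp hs'
      refine ⟨s, hs, u :: t, (mem_prodR ml rs (u :: t)).mpr ⟨u, hu, t, ht, rfl⟩, ?_, ?_⟩
      · have h1 : fresh (s ++ [u]) t = true := by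
          rw [← hf]
          apply fresh_congr
          intro y
          rw [PySem.List.mem_sorted]
        simp only [fresh, Bool.and_eq_true, Bool.not_eq_true', h1, and_true]
        simp [List.contains_eq_mem, hus]
      · rw [sorted_sorted_append, List.append_assoc, List.singleton_append]
    · rintro ⟨s, hs, t', ht', hf, rfl⟩
      obtain ⟨u, hu, t, ht, rfl⟩ := (mem_prodR ml rs t').mp ht'
      simp only [fresh, Bool.and_eq_true, Bool.not_eq_true'] at hf
      obtain ⟨hcu, hft⟩ := hf
      have hus : u ∉ s := by simpa [List.contains_eq_mem] using hcu
      refine ⟨PySem.List.sorted (s ++ [u]) (fun x => x) false,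
        (hmem1 _).mpr ⟨s, hs, u, hu, hus, rfl⟩, t, ht, ?_, ?_⟩
      · rw [← hft]
        apply fresh_congr
        intro y
        rw [PySem.List.mem_sorted]
      · rw [sorted_sorted_append, List.append_assoc, List.singleton_append]

-- ===== VERDICT (by name: the statement is the Claim_ definition above) =====
theorem solution_spec : Claim_equal_solution := by
  intro uid bid _
  unfold Spec_solution solution solution_alt
  have hml : bid.foldl
      (fun acc i => acc ++ [uid.foldl
        (fun ml j =>
          if i.toList.length == j.toList.length && aMatch i.toList j.toList
          then ml ++ [j] else ml) []]) []
      = bid.map (fun b => uid.filter (fun u => bMatch b u)) := by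
    have hinner : ∀ i : String, uid.foldl (fun ml j =>
        if i.toList.length == j.toList.length && aMatch i.toList j.toList
        then ml ++ [j] else ml) [] = uid.filter (fun u => bMatch i u) := by
      intro i
      have h := PySem.List.foldl_append_if_eq_filter
        (fun j => i.toList.length == j.toList.length && aMatch i.toList j.toList) uid []
      rw [List.nil_append] at h
      rw [h]
      exact List.filter_congr (fun j _ => aMatch_eq_bMatch i j)
    have h0 := PySem.List.foldl_append_singleton_eq_map
      (fun i => uid.foldl (fun ml j =>
        if i.toList.length == j.toList.length && aMatch i.toList j.toList
        then ml ++ [j] else ml) []) bid []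
    rw [List.nil_append] at h0
    rw [h0]
    exact List.map_congr_left (fun i _ => hinner i)
  rw [hml]
  dsimp only
  set mls := bid.map (fun b => uid.filter (fun u => bMatch b u)) with hmls
  obtain ⟨hndA, hmemA⟩ := dfsA_set mls
  obtain ⟨hndB, hmemB⟩ := bfold_mem mls (PySem.Set.add PySem.Set.empty [])
    (by simp [PySem.Set.empty, PySem.Set.add]) (by simp [PySem.Set.empty, PySem.Set.add]; rfl)
  have hperm : (dfsA mls [] []).Perm (mls.foldl bStep (PySem.Set.add PySem.Set.empty [])) := by
    rw [List.perm_ext_iff_of_nodup hndA hndB]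
    intro x
    rw [hmemA x, hmemB x]
    constructor
    · rintro ⟨t, ht, hf, rfl⟩
      exact ⟨[], by simp [PySem.Set.empty, PySem.Set.add], t, ht, hf, by rw [List.nil_append]⟩
    · rintro ⟨s, hs, t, ht, hf, rfl⟩
      have hs0 : s = [] := by simpa [PySem.Set.empty, PySem.Set.add] using hs
      subst hs0
      exact ⟨t, ht, hf, by rw [List.nil_append]⟩
  show PySem.List.len (dfsA mls [] []) = PySem.Set.len (mls.foldl bStep (PySem.Set.add PySem.Set.empty []))
  simp only [PySem.List.len, PySem.Set.len, hperm.length_eq]
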